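-- pv_equiv track=rewrite | github.com/TeeGeeDee/adventOfCode2020 | Day4/day4.py | validate2
-- ===== SOURCE A (Python) =====
-- def validate1(record: dict):
--     return all([(fld in set(record.keys())) for fld in ['byr','iyr','eyr','hgt','hcl','ecl','pid']])
--
-- def validate2(record: dict):
--     is_valid = validate1(record)
--     if not is_valid:
--         return False
--     is_valid &= record['byr'].isnumeric() and 1920<=int(record['byr'])<=2002
--     is_valid &= record['iyr'].isnumeric() and 2010<=int(record['iyr'])<=2020
--     is_valid &= record['eyr'].isnumeric() and 2020<=int(record['eyr'])<=2030
--     is_valid &= ((record['hgt'][-2:]=='cm'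
--                   and 150<=int(record['hgt'][:-2])<=193)
--                  or
--                  (record['hgt'][-2:]=='in'
--                   and 59<=int(record['hgt'][:-2])<=76)
--                  )
--     is_valid &= (record['hcl'][0]=='#'
--                  and len(record['hcl'][1:])==6
--                  and all([c in 'abcdef0123456789' for c in record['hcl'][1:]])
--                  )
--     is_valid &= record['ecl'] in ('amb','blu','brn','gry','grn','hzl','oth')
--     is_valid &= record['pid'].isnumeric() and len(record['pid'])==9
--     return is_valid
-- ===== SOURCE B (Python) =====
-- def _pyint(s):
--     try:
--         return int(s)
--     except ValueError:
--         return None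
--
--
-- def _year_rule(lo, hi):
--     def ok(s):
--         return s.isnumeric() and lo <= int(s) <= hi
--     return ok
--
--
-- def _height_ok(s):
--     n = _pyint(s[:-2])
--     if n is None:
--         return False
--     if s[-2:] == 'cm':
--         return 150 <= n <= 193
--     if s[-2:] == 'in':
--         return 59 <= n <= 76
--     return False
--
--
-- def _hair_ok(s):
--     return len(s) == 7 and s[0] == '#' and all(c in '0123456789abcdef' for c in s[1:])
--
--
-- _RULES = [
--     ('byr', _year_rule(1920, 2002)),
--     ('iyr', _year_rule(2010, 2020)),
--     ('eyr', _year_rule(2020, 2030)),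
--     ('hgt', _height_ok),
--     ('hcl', _hair_ok),
--     ('ecl', lambda s: s in ('amb', 'blu', 'brn', 'gry', 'grn', 'hzl', 'oth')),
--     ('pid', lambda s: s.isnumeric() and len(s) == 9),
-- ]
--
--
-- def validate2(record):
--     return all(fld in record and rule(record[fld]) for fld, rule in _RULES)
-- ===== Notes on version B (the rewrite author's own statement) =====
-- stated objective: idiomatic
-- what changed: A's sequence of eager `is_valid &= ...` statements (which rebuilds set(record.keys()) per field and always evaluates every rule) is replaced by a declarative table of (field, predicate) rules (year rules from one factory, height/hair as helpers with safe int parsing) folded with one short-circuiting all(). Pre_ excludes only inputs where A raises (empty hcl -> IndexError on hcl[0]; hgt ending in cm/in with unparsable prefix -> ValueError), where B returns False.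
import Mathlib
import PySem

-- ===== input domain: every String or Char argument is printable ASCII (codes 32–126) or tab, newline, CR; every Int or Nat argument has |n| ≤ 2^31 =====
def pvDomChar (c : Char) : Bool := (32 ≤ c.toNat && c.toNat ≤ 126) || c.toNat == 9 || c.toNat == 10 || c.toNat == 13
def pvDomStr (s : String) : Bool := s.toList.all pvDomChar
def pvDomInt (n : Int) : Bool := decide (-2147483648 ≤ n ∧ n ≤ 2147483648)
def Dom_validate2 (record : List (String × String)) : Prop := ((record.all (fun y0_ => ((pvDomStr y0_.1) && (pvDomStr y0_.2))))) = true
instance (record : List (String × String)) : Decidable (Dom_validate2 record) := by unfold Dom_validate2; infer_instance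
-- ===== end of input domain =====

-- B rewrites A's eager `&=`-accumulation as a table of (field, predicate) rules folded with an
-- early-exit `all`; return value only, equivalent on Pre_ (A raises outside it, B returns False there).

-- ===== PORT A =====
-- `fld in set(record.keys())` for each required field
def validate1 (record : List (String × String)) : Bool :=
  ((["byr","iyr","eyr","hgt","hcl","ecl","pid"]).map
    (fun fld => PySem.Set.contains (PySem.Set.ofList (PySem.Dict.keys (PySem.Dict.mk record))) fld)).all (fun b => b)

-- Literal transliteration of A. record[f] is a first-match dict lookup (all keys present in the
-- guarded branch, so getD's default is never read); int(...) is ported as (ofStr? …).getD 0 — the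
-- none case (Python ValueError) and hcl[0] on "" (IndexError) are excluded by Pre_validate2.
-- On the ASCII domain str.isnumeric coincides with str.isdigit (PySem.Str.strIsdigit, exact there).
def validate2 (record : List (String × String)) : Bool :=
  let d := PySem.Dict.mk record
  let is_valid := validate1 record
  if !is_valid then false else
  let is_valid := is_valid && (PySem.Str.strIsdigit (d.getD "byr" "") &&
    decide (1920 ≤ (PySem.Int.ofStr? (d.getD "byr" "")).getD 0 ∧ (PySem.Int.ofStr? (d.getD "byr" "")).getD 0 ≤ 2002))
  let is_valid := is_valid && (PySem.Str.strIsdigit (d.getD "iyr" "") &&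
    decide (2010 ≤ (PySem.Int.ofStr? (d.getD "iyr" "")).getD 0 ∧ (PySem.Int.ofStr? (d.getD "iyr" "")).getD 0 ≤ 2020))
  let is_valid := is_valid && (PySem.Str.strIsdigit (d.getD "eyr" "") &&
    decide (2020 ≤ (PySem.Int.ofStr? (d.getD "eyr" "")).getD 0 ∧ (PySem.Int.ofStr? (d.getD "eyr" "")).getD 0 ≤ 2030))
  let is_valid := is_valid &&
    ((PySem.Str.slice (d.getD "hgt" "") (some (-2)) none == "cm" &&
        decide (150 ≤ (PySem.Int.ofStr? (PySem.Str.slice (d.getD "hgt" "") none (some (-2)))).getD 0 ∧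
                (PySem.Int.ofStr? (PySem.Str.slice (d.getD "hgt" "") none (some (-2)))).getD 0 ≤ 193))
     ||
     (PySem.Str.slice (d.getD "hgt" "") (some (-2)) none == "in" &&
        decide (59 ≤ (PySem.Int.ofStr? (PySem.Str.slice (d.getD "hgt" "") none (some (-2)))).getD 0 ∧
                (PySem.Int.ofStr? (PySem.Str.slice (d.getD "hgt" "") none (some (-2)))).getD 0 ≤ 76)))
  let is_valid := is_valid &&
    ((PySem.Str.pyGet? (d.getD "hcl" "") 0 == some '#') &&
     decide (PySem.Str.len (PySem.Str.slice (d.getD "hcl" "") (some 1) none) = 6) &&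
     -- all([c in 'abcdef0123456789' for c in …]): list built by map, then all
     (((PySem.Str.slice (d.getD "hcl" "") (some 1) none).toList.map
        (fun c => PySem.Str.isIn (String.ofList [c]) "abcdef0123456789")).all (fun b => b)))
  let is_valid := is_valid && (["amb","blu","brn","gry","grn","hzl","oth"].contains (d.getD "ecl" ""))
  let is_valid := is_valid && (PySem.Str.strIsdigit (d.getD "pid" "") && decide (PySem.Str.len (d.getD "pid" "") = 9))
  is_valid

-- ===== PORT B =====
-- _year_rule(lo, hi)
def bYearOk (lo hi : Int) (s : String) : Bool :=
  PySem.Str.strIsdigit s && decide (lo ≤ (PySem.Int.ofStr? s).getD 0 ∧ (PySem.Int.ofStr? s).getD 0 ≤ hi)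

-- _height_ok: _pyint (try int except → None) is PySem.Int.ofStr?
def bHeightOk (s : String) : Bool :=
  match PySem.Int.ofStr? (PySem.Str.slice s none (some (-2))) with
  | none => false
  | some n =>
    if PySem.Str.slice s (some (-2)) none == "cm" then decide (150 ≤ n ∧ n ≤ 193)
    else if PySem.Str.slice s (some (-2)) none == "in" then decide (59 ≤ n ∧ n ≤ 76)
    else false

-- _hair_ok (the `all(… for …)` generator is a direct .all)
def bHairOk (s : String) : Bool :=
  decide (PySem.Str.len s = 7) && (PySem.Str.pyGet? s 0 == some '#') &&
  ((PySem.Str.slice s (some 1) none).toList.all (fun c => PySem.Str.isIn (String.ofList [c]) "abcdef0123456789"))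

-- _RULES
def bRules : List (String × (String → Bool)) :=
  [("byr", bYearOk 1920 2002), ("iyr", bYearOk 2010 2020), ("eyr", bYearOk 2020 2030),
   ("hgt", bHeightOk), ("hcl", bHairOk),
   ("ecl", fun s => ["amb","blu","brn","gry","grn","hzl","oth"].contains s),
   ("pid", fun s => PySem.Str.strIsdigit s && decide (PySem.Str.len s = 9))]

def validate2_alt (record : List (String × String)) : Bool :=
  bRules.all (fun fr => (PySem.Dict.mk record).contains fr.1 && fr.2 ((PySem.Dict.mk record).getD fr.1 ""))

-- ===== PRECONDITION & SPEC =====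
-- Pre_ excludes exactly the inputs on which Python A raises: with all 7 keys present, an empty
-- 'hcl' (IndexError on hcl[0]) or a 'hgt' ending in "cm"/"in" whose prefix int() rejects (ValueError).
def Pre_validate2 (record : List (String × String)) : Prop :=
  (["byr","iyr","eyr","hgt","hcl","ecl","pid"].all (fun f => (PySem.Dict.mk record).contains f)) = true →
    ((PySem.Dict.mk record).getD "hcl" "" ≠ "" ∧
     ((PySem.Str.slice ((PySem.Dict.mk record).getD "hgt" "") (some (-2)) none = "cm" ∨
       PySem.Str.slice ((PySem.Dict.mk record).getD "hgt" "") (some (-2)) none = "in") →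
      (PySem.Int.ofStr? (PySem.Str.slice ((PySem.Dict.mk record).getD "hgt" "") none (some (-2)))).isSome = true))
instance (record : List (String × String)) : Decidable (Pre_validate2 record) := by
  unfold Pre_validate2; infer_instance

def pvWitness_validate2 : (List (String × String)) :=
  [("byr","1990"),("iyr","2015"),("eyr","2025"),("hgt","180cm"),("hcl","#a1b2c3"),("ecl","amb"),("pid","123456789")]

def Spec_validate2 (record : List (String × String)) (out : Bool) : Prop := out = validate2_alt record
instance (record : List (String × String)) (out : Bool) : Decidable (Spec_validate2 record out) := by unfold Spec_validate2; infer_instance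

-- ===== CLAIM (what is proved, stated in full; the proofs are below) =====
def Claim_equal_validate2 : Prop := ∀ (record : List (String × String)), Dom_validate2 record → Pre_validate2 record → Spec_validate2 record (validate2 record)

-- ===== LEMMAS AND PROOFS =====

theorem key_contains_eq (record : List (String × String)) (f : String) :
    PySem.Set.contains (PySem.Set.ofList (PySem.Dict.keys (PySem.Dict.mk record))) f
      = (PySem.Dict.mk record).contains f := by
  simp [pysem, PySem.Dict.contains_eq_decide_mem_keys]

theorem height_eq (s : String) :
    ((PySem.Str.slice s (some (-2)) none == "cm" &&
        decide (150 ≤ (PySem.Int.ofStr? (PySem.Str.slice s none (some (-2)))).getD 0 ∧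
                (PySem.Int.ofStr? (PySem.Str.slice s none (some (-2)))).getD 0 ≤ 193))
     ||
     (PySem.Str.slice s (some (-2)) none == "in" &&
        decide (59 ≤ (PySem.Int.ofStr? (PySem.Str.slice s none (some (-2)))).getD 0 ∧
                (PySem.Int.ofStr? (PySem.Str.slice s none (some (-2)))).getD 0 ≤ 76)))
    = bHeightOk s := by
  unfold bHeightOk
  cases h : PySem.Int.ofStr? (PySem.Str.slice s none (some (-2))) with
  | none => simp [h]
  | some n =>
    simp only [h, Option.getD_some]
    cases hcm : (PySem.Str.slice s (some (-2)) none == "cm") with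
    | true =>
      have := eq_of_beq hcm
      simp [this]
    | false => simp [hcm, Bool.beq_eq_decide_eq]

theorem hair_eq (s : String) :
    ((PySem.Str.pyGet? s 0 == some '#') &&
     decide (PySem.Str.len (PySem.Str.slice s (some 1) none) = 6) &&
     ((PySem.Str.slice s (some 1) none).toList.map
        (fun c => PySem.Str.isIn (String.ofList [c]) "abcdef0123456789")).all (fun b => b))
    = bHairOk s := by
  unfold bHairOk
  rw [List.all_map]
  cases hl : s.toList with
  | nil => simp [pysem, PySem.Str.pyGet?, PySem.Chars.pyGet?, hl, PySem.Str.len, PySem.Str.slice]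
  | cons c cs =>
    have h1 : PySem.Str.pyGet? s 0 = some c := by simp [pysem, hl]
    have h2 : (PySem.Str.slice s (some 1) none).toList = cs := by
      simp [pysem, PySem.List.slice_from_one, hl]
    have h3 : PySem.Str.len s = cs.length + 1 := by simp [pysem, hl]
    have h4 : PySem.Str.len (PySem.Str.slice s (some 1) none) = cs.length := by
      simp [pysem, h2]
    rw [h1, h2, h3, h4]
    cases hc : (some c == some '#') with
    | true =>
      have hlen : ((cs.length : Int) = 6) ↔ ((cs.length : Int) + 1 = 7) := by omega
      simp only [hlen, Bool.true_and, Bool.and_true]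
      rfl
    | false => simp [hc]

theorem main_eq (record : List (String × String)) : validate2 record = validate2_alt record := by
  have hk : ∀ f, PySem.Set.contains (PySem.Set.ofList (PySem.Dict.keys (PySem.Dict.mk record))) f
      = (PySem.Dict.mk record).contains f := key_contains_eq record
  unfold validate2 validate2_alt validate1 bRules
  simp only [List.map_cons, List.map_nil, List.all_cons, List.all_nil, hk, height_eq, hair_eq,
    bYearOk, Bool.and_true, Bool.true_and]
  cases h1 : (PySem.Dict.mk record).contains "byr" <;>
  cases h2 : (PySem.Dict.mk record).contains "iyr" <;>
  cases h3 : (PySem.Dict.mk record).contains "eyr" <;>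
  cases h4 : (PySem.Dict.mk record).contains "hgt" <;>
  cases h5 : (PySem.Dict.mk record).contains "hcl" <;>
  cases h6 : (PySem.Dict.mk record).contains "ecl" <;>
  cases h7 : (PySem.Dict.mk record).contains "pid" <;>
  simp [h1, h2, h3, h4, h5, h6, h7, Bool.and_assoc]

-- ===== VERDICT (by name: the statement is the Claim_ definition above) =====
theorem validate2_spec : Claim_equal_validate2 := by
  intro record _ _
  unfold Spec_validate2
  exact main_eq record
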